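-- pv_equiv track=rewrite | github.com/wannabetter/LeetCode | 2660.py | isWinner
-- ===== SOURCE A (Python) =====
-- from typing import List
--
-- def isWinner(player1: List[int], player2: List[int]) -> int:
--     score1, score2 = 0, 0
--     double, temp = False, 0
--     for play1 in player1:
--         if not double:
--             score1 += play1
--         else:
--             score1 += play1 * 2
--             temp = (temp + 1) % 2
--             double = False if temp == 0 else True
--         if play1 == 10:
--             double = True
--             temp = 0
--     double, temp = False, 0
--     for play2 in player2:
--         if not double:
--             score2 += play2
--         else:
--             score2 += play2 * 2
--             temp = (temp + 1) % 2
--             double = False if temp == 0 else True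
--         if play2 == 10:
--             double = True
--             temp = 0
--     return 1 if score1 > score2 else 0 if score1 == score2 else 2
-- ===== SOURCE B (Python) =====
-- from typing import List
--
-- def isWinner(player1: List[int], player2: List[int]) -> int:
--     def score(p: List[int]) -> int:
--         s = 0
--         for i in range(len(p)):
--             if (i >= 1 and p[i - 1] == 10) or (i >= 2 and p[i - 2] == 10):
--                 s += 2 * p[i]
--             else:
--                 s += p[i]
--         return s
--     s1, s2 = score(player1), score(player2)
--     return 1 if s1 > s2 else 0 if s1 == s2 else 2
-- ===== Notes on version B (the rewrite author's own statement) =====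
-- stated objective: simpler
-- what changed: Replaces A's double/temp flag-and-counter state machine (duplicated for both players) with one helper that scores by direct index lookback at the previous two throws.
import Mathlib
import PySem

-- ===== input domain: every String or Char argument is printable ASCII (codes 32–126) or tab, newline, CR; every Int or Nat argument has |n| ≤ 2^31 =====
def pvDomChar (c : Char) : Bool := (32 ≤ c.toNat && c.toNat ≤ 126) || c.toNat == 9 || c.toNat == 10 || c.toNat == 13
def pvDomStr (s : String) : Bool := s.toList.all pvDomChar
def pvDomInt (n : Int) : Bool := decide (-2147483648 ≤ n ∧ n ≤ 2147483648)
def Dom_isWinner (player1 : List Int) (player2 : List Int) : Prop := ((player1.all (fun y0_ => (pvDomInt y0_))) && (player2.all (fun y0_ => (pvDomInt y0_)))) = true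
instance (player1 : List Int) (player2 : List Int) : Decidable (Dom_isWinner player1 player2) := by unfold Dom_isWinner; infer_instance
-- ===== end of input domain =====

-- B replaces A's double/temp flag-and-counter state machine (written out twice) with one
-- helper that looks back at the previous two throws by index; same O(n) cost, simpler code.

-- ===== PORT A =====
-- one step of A's loop body on the state (score, double, temp)
def pvStepA (st : Int × Bool × Int) (play : Int) : Int × Bool × Int :=
  let score := st.1
  let double := st.2.1
  let temp := st.2.2
  let st' :=
    if !double then (score + play, double, temp)
    else
      let temp := PySem.Int.mod (temp + 1) 2
      (score + play * 2, if temp == 0 then false else true, temp)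
  if play == 10 then (st'.1, true, (0 : Int)) else st'

def isWinner (player1 : List Int) (player2 : List Int) : Int :=
  let st1 := player1.foldl pvStepA (0, false, 0)
  let st2 := player2.foldl pvStepA (0, false, 0)
  if st1.1 > st2.1 then 1 else if st1.1 == st2.1 then 0 else 2

-- ===== PORT B =====
-- B's helper `score`: loop over indices, doubling when one of the previous two throws was a 10
def pvScoreB (p : List Int) : Int :=
  (List.range p.length).foldl
    (fun s i =>
      if (1 ≤ i ∧ p.getD (i - 1) 0 = 10) ∨ (2 ≤ i ∧ p.getD (i - 2) 0 = 10) then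
        s + 2 * p.getD i 0
      else
        s + p.getD i 0)
    0

def isWinner_alt (player1 : List Int) (player2 : List Int) : Int :=
  let s1 := pvScoreB player1
  let s2 := pvScoreB player2
  if s1 > s2 then 1 else if s1 == s2 then 0 else 2

-- ===== PRECONDITION & SPEC =====
def Spec_isWinner (player1 : List Int) (player2 : List Int) (out : Int) : Prop := out = isWinner_alt player1 player2
instance (player1 : List Int) (player2 : List Int) (out : Int) : Decidable (Spec_isWinner player1 player2 out) := by unfold Spec_isWinner; infer_instance

-- ===== CLAIM (what is proved, stated in full; the proofs are below) =====
def Claim_equal_isWinner : Prop := ∀ (player1 : List Int) (player2 : List Int), Dom_isWinner player1 player2 → Spec_isWinner player1 player2 (isWinner player1 player2)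

-- ===== LEMMAS AND PROOFS =====

-- common reference: sum with two boolean flags "previous throw was 10" / "throw before that was 10"
def pvLook : List Int → Bool → Bool → Int
  | [], _, _ => 0
  | x :: xs, d1, d2 => (if d1 || d2 then 2 * x else x) + pvLook xs (decide (x = 10)) d1

-- A side: the foldl with state (s, d1||d2, encoded temp) computes s + pvLook
theorem foldlA_eq_look (p : List Int) : ∀ (s : Int) (d1 d2 : Bool),
    (p.foldl pvStepA (s, d1 || d2, (if d1 then (0:Int) else if d2 then 1 else 0))).1
      = s + pvLook p d1 d2 := by
  induction p with
  | nil => intro s d1 d2; simp [pvLook]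
  | cons x xs ih =>
    intro s d1 d2
    cases d1 <;> cases d2 <;> by_cases hx : x = 10 <;>
      simp only [List.foldl_cons, pvStepA, pvLook, hx] <;>
      simp [PySem.Int.mod, hx]
    · have h := ih (s + 10) true false; simp at h; omega
    · have h := ih (s + x) false false; simp at h; omega
    · have h := ih (s + 20) true false; simp at h; omega
    · have h := ih (s + x * 2) false false; simp at h; omega
    · have h := ih (s + 20) true true; simp at h; omega
    · have h := ih (s + x * 2) false true; simp at h; omega
    · have h := ih (s + 20) true true; simp at h; omega
    · have h := ih (s + x * 2) false true; simp at h; omega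

theorem foldlA (p : List Int) :
    (p.foldl pvStepA (0, false, 0)).1 = pvLook p false false := by
  have h := foldlA_eq_look p 0 false false
  simpa using h

-- B side: the index loop over a suffix computes pvLook of the dropped list
theorem scoreB_suffix (p : List Int) : ∀ (n j : Nat) (s : Int), n = p.length - j →
    ((List.range' j n).foldl
      (fun s i =>
        if (1 ≤ i ∧ p.getD (i - 1) 0 = 10) ∨ (2 ≤ i ∧ p.getD (i - 2) 0 = 10) then
          s + 2 * p.getD i 0
        else
          s + p.getD i 0) s)
      = s + pvLook (p.drop j)
          (decide (1 ≤ j) && (p.getD (j - 1) 0 == 10))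
          (decide (2 ≤ j) && (p.getD (j - 2) 0 == 10)) := by
  intro n
  induction n with
  | zero =>
    intro j s h
    have hd : p.drop j = [] := List.drop_eq_nil_of_le (by omega)
    simp [hd, pvLook]
  | succ n ih =>
    intro j s h
    have hj : j < p.length := by omega
    have hdrop : p.drop j = p[j] :: p.drop (j + 1) := List.drop_eq_getElem_cons hj
    have hgd : p.getD j 0 = p[j] := List.getD_eq_getElem p 0 hj
    rw [List.range'_succ, List.foldl_cons, hdrop]
    simp only [pvLook]
    have e1 : (decide (1 ≤ j + 1) && (p.getD (j + 1 - 1) 0 == 10)) = decide (p[j] = 10) := by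
      simp only [Nat.add_sub_cancel, hgd, Nat.le_add_left, decide_true, Bool.true_and]
      exact beq_eq_decide p[j] 10
    have e2 : (decide (2 ≤ j + 1) && (p.getD (j + 1 - 2) 0 == 10))
        = (decide (1 ≤ j) && (p.getD (j - 1) 0 == 10)) := by
      have h2 : j + 1 - 2 = j - 1 := by omega
      have h3 : decide (2 ≤ j + 1) = decide (1 ≤ j) := by rw [decide_eq_decide]; omega
      rw [h2, h3]
    have h' := ih (j + 1)
      (if (1 ≤ j ∧ p.getD (j - 1) 0 = 10) ∨ (2 ≤ j ∧ p.getD (j - 2) 0 = 10) then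
          s + 2 * p.getD j 0
        else
          s + p.getD j 0) (by omega)
    rw [h', e1, e2]
    by_cases hc : (1 ≤ j ∧ p.getD (j - 1) 0 = 10) ∨ (2 ≤ j ∧ p.getD (j - 2) 0 = 10)
    · have hb : (decide (1 ≤ j) && (p.getD (j - 1) 0 == 10)
          || decide (2 ≤ j) && (p.getD (j - 2) 0 == 10)) = true := by
        simp only [Bool.or_eq_true, Bool.and_eq_true, decide_eq_true_eq, beq_iff_eq]
        exact hc
      rw [if_pos hc, hb, if_pos rfl, hgd]
      ring
    · have hb : (decide (1 ≤ j) && (p.getD (j - 1) 0 == 10)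
          || decide (2 ≤ j) && (p.getD (j - 2) 0 == 10)) = false := by
        simp only [Bool.or_eq_false_iff, Bool.and_eq_false_iff]
        push Not at hc
        constructor
        · by_cases h1 : 1 ≤ j
          · right; simpa using hc.1 h1
          · left; simpa using h1
        · by_cases h1 : 2 ≤ j
          · right; simpa using hc.2 h1
          · left; simpa using h1
      rw [if_neg hc, hb]
      simp only [Bool.false_eq_true, if_false]
      rw [hgd]; ring

theorem scoreB (p : List Int) : pvScoreB p = pvLook p false false := by
  have h := scoreB_suffix p p.length 0 0 (by simp)
  simpa [pvScoreB, List.range_eq_range'] using h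

-- ===== VERDICT (by name: the statement is the Claim_ definition above) =====
theorem isWinner_spec : Claim_equal_isWinner := by
  intro p1 p2 _
  unfold Spec_isWinner isWinner isWinner_alt
  simp only [foldlA, scoreB]
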